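-- pv_equiv track=rewrite | github.com/TheAntTeam/gerbyx | src/gerbyx/check_remove_g04.py | strip_g04_comments_line
-- ===== SOURCE A (Python) =====
-- def strip_g04_comments_line(line: str) -> str:
--     """
--     Rimuove tutti i segmenti commento G04 su una singola riga.
--     - Se c'è un '*', elimina 'G04 ... *' incluso l'asterisco.
--     - Se non c'è '*', elimina 'G04 ...' fino a fine riga.
--     """
--     i = 0
--     out = []
--     n = len(line)
--     while i < n:
--         idx = line.find("G04", i)
--         if idx == -1:
--             # nessun altro G04: conserva il resto
--             out.append(line[i:])
--             break
--         # conserva la parte prima del commento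
--         out.append(line[i:idx])
--         # cerca il terminatore '*'
--         star = line.find('*', idx + 3)
--         if star == -1:
--             # niente '*': commento fino a fine riga
--             # scarta il resto della riga
--             break
--         # salta il segmento commento includendo '*'
--         i = star + 1
--
--     # ricompone e normalizza spazi extra
--     cleaned = ''.join(out).strip()
--     return cleaned
-- ===== SOURCE B (Python) =====
-- def strip_g04_comments_line(line: str) -> str:
--     """Remove G04 comment segments by recursion on the remainder of the line."""
--     def scan(s: str) -> str:
--         idx = s.find("G04")
--         if idx == -1:
--             return s
--         star = s.find('*', idx + 3)
--         if star == -1: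
--             return s[:idx]
--         return s[:idx] + scan(s[star + 1:])
--     return scan(line).strip()
-- ===== Notes on version B (the rewrite author's own statement) =====
-- stated objective: simpler
-- what changed: Replaces the index-driven while loop with a mutable index and an output-list accumulator by a short recursion on the remainder of the line: cut off the prefix before the G04 marker, recurse on the text after the comment terminator.
import Mathlib
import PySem

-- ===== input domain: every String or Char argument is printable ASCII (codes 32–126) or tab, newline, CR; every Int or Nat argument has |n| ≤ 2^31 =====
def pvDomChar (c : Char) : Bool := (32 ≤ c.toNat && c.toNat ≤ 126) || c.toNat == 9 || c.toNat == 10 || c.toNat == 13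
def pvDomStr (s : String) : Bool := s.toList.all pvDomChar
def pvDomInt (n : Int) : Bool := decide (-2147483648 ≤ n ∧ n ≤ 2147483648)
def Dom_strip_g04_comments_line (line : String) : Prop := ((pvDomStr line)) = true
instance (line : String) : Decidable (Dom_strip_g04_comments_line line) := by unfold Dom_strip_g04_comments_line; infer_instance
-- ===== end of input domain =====

-- B replaces A's index-driven while loop (mutable index + output-list accumulator)
-- by a short recursion on the remainder of the line: simpler decomposition, same O(n) cost.


-- ===== PORT A =====
-- A's while loop; fuel is only a totality guard (i grows by ≥ 4 each iteration, so
-- line.length + 1 steps always suffice).  'out' holds the joined-so-far pieces (''.join).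
def stripA_loop (line : List Char) (fuel : Nat) (i : Int) (out : List Char) : List Char :=
  match fuel with
  | 0 => out
  | fuel + 1 =>
    if i < (line.length : Int) then
      let idx := PySem.Chars.findFrom line (['G', '0', '4'] : List Char) i none
      if idx = -1 then out ++ PySem.List.slice line (some i) none
      else
        let out2 := out ++ PySem.List.slice line (some i) (some idx)
        let star := PySem.Chars.findFrom line ['*'] (idx + 3) none
        if star = -1 then out2
        else stripA_loop line fuel (star + 1) out2
    else out

def strip_g04_comments_line (line : String) : String :=
  String.ofList (PySem.Chars.strip (stripA_loop line.toList (line.toList.length + 1) 0 []))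

-- ===== PORT B =====
-- B's helper 'scan': recursion on the remainder; fuel is only a totality guard
-- (the recursive argument is a strict suffix, so length + 1 steps suffice).
def stripB_scan (s : List Char) (fuel : Nat) : List Char :=
  match fuel with
  | 0 => s
  | fuel + 1 =>
    let idx := PySem.Chars.find s (['G', '0', '4'] : List Char)
    if idx = -1 then s
    else
      let star := PySem.Chars.findFrom s ['*'] (idx + 3) none
      if star = -1 then PySem.List.slice s none (some idx)
      else PySem.List.slice s none (some idx) ++
             stripB_scan (PySem.List.slice s (some (star + 1)) none) fuel

def strip_g04_comments_line_alt (line : String) : String :=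
  String.ofList (PySem.Chars.strip (stripB_scan line.toList (line.toList.length + 1)))

-- ===== PRECONDITION & SPEC =====
def Spec_strip_g04_comments_line (line : String) (out : String) : Prop := out = strip_g04_comments_line_alt line
instance (line : String) (out : String) : Decidable (Spec_strip_g04_comments_line line out) := by unfold Spec_strip_g04_comments_line; infer_instance

-- ===== CLAIM (what is proved, stated in full; the proofs are below) =====
def Claim_equal_strip_g04_comments_line : Prop := ∀ (line : String), Dom_strip_g04_comments_line line → Spec_strip_g04_comments_line line (strip_g04_comments_line line)

-- ===== LEMMAS AND PROOFS =====

theorem stripA_eq_stripB (line : List Char) :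
    ∀ (fuel k : Nat) (out : List Char), line.length - k < fuel →
      stripA_loop line fuel (k : Int) out = out ++ stripB_scan (line.drop k) fuel := by
  intro fuel
  induction fuel with
  | zero => intro k out h; omega
  | succ fuel ih =>
    intro k out h
    by_cases hk : k < line.length
    · -- inside the string
      have hk' : (k : Int) < (line.length : Int) := by exact_mod_cast hk
      simp only [stripA_loop, stripB_scan]
      rw [if_pos hk']
      rw [PySem.Chars.findFrom_natCast line (['G', '0', '4'] : List Char) k (by omega)]
      by_cases hf : PySem.Chars.find (line.drop k) (['G', '0', '4'] : List Char) = -1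
      · rw [if_pos (by rw [hf]; rfl)]
        rw [hf, if_pos rfl, PySem.List.slice_from_natCast]
      · -- G04 found at k + j
        obtain ⟨j, hj⟩ : ∃ j : Nat, PySem.Chars.find (line.drop k) (['G', '0', '4'] : List Char) = (j : Int) := by
          have h1 := PySem.Chars.neg_one_le_find (line.drop k) (['G', '0', '4'] : List Char)
          exact ⟨(PySem.Chars.find (line.drop k) (['G', '0', '4'] : List Char)).toNat, by omega⟩
        have hidx : (if PySem.Chars.find (line.drop k) (['G', '0', '4'] : List Char) = -1 then (-1 : Int)
            else (k : Int) + PySem.Chars.find (line.drop k) (['G', '0', '4'] : List Char)) = ((k + j : Nat) : Int) := by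
          rw [if_neg hf, hj]; push_cast; ring
        rw [hidx, if_neg (by push_cast; omega), hj, if_neg (show ¬((j : Nat) : Int) = -1 by omega)]
        -- the prefix fact: (['G', '0', '4'] : List Char) starts at position k + j, so k + j + 3 ≤ line.length
        have hpre : (['G', '0', '4'] : List Char) <+: (line.drop k).drop j := by
          have h0 : (0 : Int) ≤ PySem.Chars.find (line.drop k) (['G', '0', '4'] : List Char) := by rw [hj]; omega
          have := (PySem.Chars.find_spec h0).1
          rwa [hj, Int.toNat_natCast] at this
        have hlen3 : k + j + 3 ≤ line.length := by
          have := hpre.length_le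
          simp only [List.length_cons, List.length_nil, List.length_drop] at this
          omega
        have hdd : (line.drop k).drop (j + 3) = line.drop (k + j + 3) := by
          rw [List.drop_drop]; congr 1
        -- rewrite both star searches down to the same plain find
        have hstarA : PySem.Chars.findFrom line ['*'] (((k + j : Nat) : Int) + 3) none
            = (if PySem.Chars.find (line.drop (k + j + 3)) ['*'] = -1 then (-1 : Int)
               else ((k + j + 3 : Nat) : Int) + PySem.Chars.find (line.drop (k + j + 3)) ['*']) := by
          have : (((k + j : Nat) : Int) + 3) = ((k + j + 3 : Nat) : Int) := by push_cast; ring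
          rw [this, PySem.Chars.findFrom_natCast line ['*'] (k + j + 3) (by omega)]
        have hstarB : PySem.Chars.findFrom (line.drop k) ['*'] ((j : Int) + 3) none
            = (if PySem.Chars.find (line.drop (k + j + 3)) ['*'] = -1 then (-1 : Int)
               else ((j + 3 : Nat) : Int) + PySem.Chars.find (line.drop (k + j + 3)) ['*']) := by
          have h3 : ((j : Int) + 3) = ((j + 3 : Nat) : Int) := by push_cast; ring
          rw [h3, PySem.Chars.findFrom_natCast (line.drop k) ['*'] (j + 3)
                (by simp [List.length_drop]; omega), hdd]
        rw [hstarA, hstarB]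
        by_cases hg : PySem.Chars.find (line.drop (k + j + 3)) ['*'] = -1
        · rw [if_pos (by rw [hg]; rfl), if_pos (by rw [hg]; rfl)]
          rw [PySem.List.slice_natCast, PySem.List.slice_to_natCast]
          congr 1
          congr 1
          omega
        · obtain ⟨t, ht⟩ : ∃ t : Nat, PySem.Chars.find (line.drop (k + j + 3)) ['*'] = (t : Int) := by
            have h1 := PySem.Chars.neg_one_le_find (line.drop (k + j + 3)) ['*']
            exact ⟨(PySem.Chars.find (line.drop (k + j + 3)) ['*']).toNat, by omega⟩
          have hstar_lt : t < line.length - (k + j + 3) := by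
            have h0 : (0 : Int) ≤ PySem.Chars.find (line.drop (k + j + 3)) ['*'] := by
              rw [ht]; omega
            have hsp := (PySem.Chars.find_spec h0).1
            rw [ht, Int.toNat_natCast] at hsp
            have := hsp.length_le
            simp only [List.length_cons, List.length_nil, List.length_drop] at this
            omega
          have hne : ¬((t : Nat) : Int) = -1 := by omega
          rw [ht]
          simp only [if_neg hne]
          rw [if_neg (show ¬((k + j + 3 : Nat) : Int) + (t : Int) = -1 by push_cast; omega),
              if_neg (show ¬((j + 3 : Nat) : Int) + (t : Int) = -1 by push_cast; omega)]
          have e1 : ((k + j + 3 : Nat) : Int) + (t : Int) + 1 = ((k + j + 3 + t + 1 : Nat) : Int) := by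
            push_cast; ring
          have e2 : ((j + 3 : Nat) : Int) + (t : Int) + 1 = ((j + 3 + t + 1 : Nat) : Int) := by
            push_cast; ring
          have hfb : line.length - (k + j + 3 + t + 1) < fuel := by omega
          rw [e1, e2, ih (k + j + 3 + t + 1) _ hfb]
          rw [PySem.List.slice_natCast, PySem.List.slice_to_natCast,
              PySem.List.slice_from_natCast, List.drop_drop, List.append_assoc]
          have g1 : k + j - k = j := by omega
          have g2 : k + (j + 3 + t + 1) = k + j + 3 + t + 1 := by omega
          rw [g1, g2]
    · -- past the end: A leaves the loop, B finds nothing in the empty remainder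
      have hdrop : line.drop k = [] := List.drop_eq_nil_of_le (by omega)
      have hfind : PySem.Chars.find (line.drop k) (['G', '0', '4'] : List Char) = -1 := by
        rw [hdrop, PySem.Chars.find_eq_neg_one_iff]
        intro hinf
        have := hinf.length_le
        simp at this
      simp only [stripA_loop, stripB_scan]
      rw [if_neg (show ¬((k : Int) < (line.length : Int)) by exact_mod_cast hk), if_pos hfind,
          hdrop, List.append_nil]

-- ===== VERDICT (by name: the statement is the Claim_ definition above) =====
theorem strip_g04_comments_line_spec : Claim_equal_strip_g04_comments_line := by
  intro line _
  unfold Spec_strip_g04_comments_line strip_g04_comments_line strip_g04_comments_line_alt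
  have h := stripA_eq_stripB line.toList (line.toList.length + 1) 0 [] (by omega)
  simp only [Nat.cast_zero, List.drop_zero, List.nil_append] at h
  rw [h]
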